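-- pv_equiv track=rewrite | github.com/epoyraz/leetcode | solutions/1696.py | isPrintable
-- ===== SOURCE A (Python) =====
-- from collections import defaultdict, deque
--
-- def isPrintable(targetGrid):
--     """
--     :type targetGrid: List[List[int]]
--     :rtype: bool
--     """
--     m, n = len(targetGrid), len(targetGrid[0])
--     # find all colors
--     colors = set()
--     for row in targetGrid:
--         for c in row:
--             colors.add(c)
--
--     # bounding box for each color: minr, maxr, minc, maxc
--     INF = 10**9
--     minr = {c: INF for c in colors}
--     maxr = {c: -INF for c in colors}
--     minc = {c: INF for c in colors}
--     maxc = {c: -INF for c in colors}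
--
--     for i in range(m):
--         for j in range(n):
--             c = targetGrid[i][j]
--             if i < minr[c]: minr[c] = i
--             if i > maxr[c]: maxr[c] = i
--             if j < minc[c]: minc[c] = j
--             if j > maxc[c]: maxc[c] = j
--
--     # build graph: edge c -> d if c's rectangle covers a cell of color d!=c
--     adj = defaultdict(set)
--     indegree = {c: 0 for c in colors}
--
--     for c in colors:
--         for i in range(minr[c], maxr[c] + 1):
--             for j in range(minc[c], maxc[c] + 1):
--                 d = targetGrid[i][j]
--                 if d != c and d not in adj[c]:
--                     adj[c].add(d)
--                     indegree[d] += 1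
--
--     # topological sort (Kahn's algorithm)
--     q = deque([c for c in colors if indegree[c] == 0])
--     processed = 0
--
--     while q:
--         u = q.popleft()
--         processed += 1
--         for v in adj[u]:
--             indegree[v] -= 1
--             if indegree[v] == 0:
--                 q.append(v)
--
--     # if all colors processed, no cycle
--     return processed == len(colors)
-- ===== SOURCE B (Python) =====
-- def isPrintable(targetGrid):
--     n = len(targetGrid[0])
--     colors = {c for row in targetGrid for c in row}
--     INF = 10**9
--     box = {c: (INF, -INF, INF, -INF) for c in colors}
--     for i in range(len(targetGrid)):
--         row = targetGrid[i]
--         for j in range(n):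
--             r0, r1, c0, c1 = box[row[j]]
--             box[row[j]] = (min(r0, i), max(r1, i), min(c0, j), max(c1, j))
--     # preds[c] = colors whose bounding rectangle covers some cell of color c
--     preds = {c: set() for c in colors}
--     for d in colors:
--         r0, r1, c0, c1 = box[d]
--         for i in range(r0, r1 + 1):
--             for j in range(c0, c1 + 1):
--                 c = targetGrid[i][j]
--                 if c != d:
--                     preds[c].add(d)
--     # peel: repeatedly drop every color with no remaining predecessor
--     remaining = set(colors)
--     while True:
--         removable = {c for c in remaining if not (preds[c] & remaining)}
--         if not removable:
--             return not remaining
--         remaining -= removable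
-- ===== Notes on version B (the rewrite author's own statement) =====
-- stated objective: alternative
-- what changed: Replaces Kahn's indegree/deque topological sort with round-based source elimination over predecessor sets (no indegree counters, no queue: each round drops every color with no remaining predecessor; printable iff everything gets dropped), and builds the bounding boxes as one tuple-valued dict in a single pass instead of four separate min/max dicts.
import Mathlib
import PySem

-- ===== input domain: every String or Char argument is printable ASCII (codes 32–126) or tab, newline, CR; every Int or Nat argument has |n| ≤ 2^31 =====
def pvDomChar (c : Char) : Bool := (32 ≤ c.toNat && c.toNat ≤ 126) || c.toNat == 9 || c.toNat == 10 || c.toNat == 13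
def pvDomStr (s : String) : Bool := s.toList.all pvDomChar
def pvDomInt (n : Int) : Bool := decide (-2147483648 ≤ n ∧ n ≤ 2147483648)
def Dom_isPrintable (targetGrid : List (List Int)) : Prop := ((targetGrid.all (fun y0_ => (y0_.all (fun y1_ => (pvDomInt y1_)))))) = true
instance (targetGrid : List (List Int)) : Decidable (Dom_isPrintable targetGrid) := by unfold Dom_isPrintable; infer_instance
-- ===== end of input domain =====

-- B replaces A's Kahn indegree/deque topological sort by round-based source elimination
-- (peel every color with no remaining predecessor, round by round) — same return value on
-- every input where A returns (Pre_ excludes exactly the grids where both raise IndexError).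

-- shared totalization of the subscript targetGrid[i][j] (Python raises only outside Pre_)
def pvCell (targetGrid : List (List Int)) (i j : Int) : Int :=
  PySem.List.pyGetD (PySem.List.pyGetD targetGrid i []) j 0

-- ===== PORT A =====

-- colors = set(); for row in targetGrid: for c in row: colors.add(c)
def pvColorsA (targetGrid : List (List Int)) : PySem.Set Int :=
  targetGrid.foldl (fun s row => row.foldl (fun s c => PySem.Set.add s c) s) PySem.Set.empty

-- the four bounding-box dicts minr/maxr/minc/maxc
structure pvBB where
  minr : PySem.Dict Int Int
  maxr : PySem.Dict Int Int
  minc : PySem.Dict Int Int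
  maxc : PySem.Dict Int Int
deriving Repr, DecidableEq

def pvBBoxA (targetGrid : List (List Int)) : pvBB :=
  let colors := pvColorsA targetGrid
  let m : Int := PySem.List.len targetGrid
  let n : Int := PySem.List.len (PySem.List.pyGetD targetGrid 0 [])
  let INF : Int := 10 ^ 9
  let st0 : pvBB :=
    { minr := colors.foldl (fun d c => d.insert c INF) PySem.Dict.empty
      maxr := colors.foldl (fun d c => d.insert c (-INF)) PySem.Dict.empty
      minc := colors.foldl (fun d c => d.insert c INF) PySem.Dict.empty
      maxc := colors.foldl (fun d c => d.insert c (-INF)) PySem.Dict.empty }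
  (PySem.List.pyRange 0 m 1).foldl (fun st i =>
    (PySem.List.pyRange 0 n 1).foldl (fun st j =>
      let c := pvCell targetGrid i j
      let st := if i < st.minr.getD c 0 then { st with minr := st.minr.insert c i } else st
      let st := if i > st.maxr.getD c 0 then { st with maxr := st.maxr.insert c i } else st
      let st := if j < st.minc.getD c 0 then { st with minc := st.minc.insert c j } else st
      let st := if j > st.maxc.getD c 0 then { st with maxc := st.maxc.insert c j } else st
      st) st) st0

-- adj = defaultdict(set); indegree = {c: 0 for c in colors}; the triple scan filling both
def pvAdjIndA (targetGrid : List (List Int)) :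
    PySem.Dict Int (PySem.Set Int) × PySem.Dict Int Int :=
  let colors := pvColorsA targetGrid
  let bb := pvBBoxA targetGrid
  let ind0 : PySem.Dict Int Int := colors.foldl (fun d c => d.insert c 0) PySem.Dict.empty
  colors.foldl (fun p c =>
    (PySem.List.pyRange (bb.minr.getD c 0) (bb.maxr.getD c 0 + 1) 1).foldl (fun p i =>
      (PySem.List.pyRange (bb.minc.getD c 0) (bb.maxc.getD c 0 + 1) 1).foldl (fun p j =>
        let d := pvCell targetGrid i j
        let adjc := p.1.getD c PySem.Set.empty
        if d ≠ c ∧ ¬ d ∈ adjc then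
          (p.1.insert c (PySem.Set.add adjc d), p.2.modify d 0 (· + 1))
        else p) p) p)
    (PySem.Dict.empty, ind0)

-- while q: u = q.popleft(); processed += 1; for v in adj[u]: …   (fuel only totalizes; proved unreachable)
def pvKahnLoopA (adj : PySem.Dict Int (PySem.Set Int)) :
    Nat → List Int → PySem.Dict Int Int → Int → Int
  | _, [], _, processed => processed
  | 0, _ :: _, _, processed => processed
  | fuel + 1, u :: rest, ind, processed =>
      let st := (adj.getD u PySem.Set.empty).foldl
        (fun (st : List Int × PySem.Dict Int Int) v =>
          let ind' := st.2.modify v 0 (· - 1)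
          if ind'.getD v 0 = 0 then (st.1 ++ [v], ind') else (st.1, ind'))
        (rest, ind)
      pvKahnLoopA adj fuel st.1 st.2 (processed + 1)

def isPrintable (targetGrid : List (List Int)) : Bool :=
  let colors := pvColorsA targetGrid
  let p := pvAdjIndA targetGrid
  let q0 := colors.filter (fun c => p.2.getD c 0 = 0)
  let processed := pvKahnLoopA p.1 (colors.length + 1) q0 p.2 0
  processed = (PySem.List.len colors)

-- ===== PORT B =====

-- colors = {c for row in targetGrid for c in row}
def pvColorsB (targetGrid : List (List Int)) : PySem.Set Int :=
  PySem.Set.ofList targetGrid.flatten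

-- box = {c: (INF, -INF, INF, -INF) for c in colors}, then one min/max pass
def pvBoxB (targetGrid : List (List Int)) : PySem.Dict Int (Int × Int × Int × Int) :=
  let colors := pvColorsB targetGrid
  let n : Int := PySem.List.len (PySem.List.pyGetD targetGrid 0 [])
  let INF : Int := 10 ^ 9
  let box0 : PySem.Dict Int (Int × Int × Int × Int) :=
    colors.foldl (fun d c => d.insert c (INF, -INF, INF, -INF)) PySem.Dict.empty
  (PySem.List.pyRange 0 (PySem.List.len targetGrid) 1).foldl (fun box i =>
    let row := PySem.List.pyGetD targetGrid i []
    (PySem.List.pyRange 0 n 1).foldl (fun box j =>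
      let c := PySem.List.pyGetD row j 0
      let t := box.getD c (0, 0, 0, 0)
      box.insert c (min t.1 i, max t.2.1 i, min t.2.2.1 j, max t.2.2.2 j)) box) box0

-- preds[c] = colors whose bounding rectangle covers some cell of color c
def pvPredsB (targetGrid : List (List Int)) : PySem.Dict Int (PySem.Set Int) :=
  let colors := pvColorsB targetGrid
  let box := pvBoxB targetGrid
  let pr0 : PySem.Dict Int (PySem.Set Int) :=
    colors.foldl (fun d c => d.insert c PySem.Set.empty) PySem.Dict.empty
  colors.foldl (fun pr d =>
    let t := box.getD d (0, 0, 0, 0)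
    (PySem.List.pyRange t.1 (t.2.1 + 1) 1).foldl (fun pr i =>
      (PySem.List.pyRange t.2.2.1 (t.2.2.2 + 1) 1).foldl (fun pr j =>
        let c := pvCell targetGrid i j
        if c ≠ d then pr.insert c (PySem.Set.add (pr.getD c PySem.Set.empty) d)
        else pr) pr) pr) pr0

-- the peeling loop: drop every remaining color with no remaining predecessor, round by round
def pvPeelB (preds : PySem.Dict Int (PySem.Set Int)) :
    Nat → PySem.Set Int → Bool
  | 0, rem => rem.isEmpty
  | fuel + 1, rem =>
      let removable := rem.filter
        (fun c => (PySem.Set.inter (preds.getD c PySem.Set.empty) rem).isEmpty)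
      if removable.isEmpty then rem.isEmpty
      else pvPeelB preds fuel (PySem.Set.diff rem removable)

def isPrintable_alt (targetGrid : List (List Int)) : Bool :=
  let colors := pvColorsB targetGrid
  pvPeelB (pvPredsB targetGrid) (colors.length + 1) colors

-- ===== PRECONDITION & SPEC =====
-- Pre_ excludes exactly the grids on which the Python A raises IndexError: the empty grid
-- (targetGrid[0]) and grids where some row is shorter than the first row (the column loops
-- index every row at all j < len(targetGrid[0])).  B raises there too.
def Pre_isPrintable (targetGrid : List (List Int)) : Prop :=
  targetGrid ≠ [] ∧ ∀ row ∈ targetGrid, (targetGrid.headD []).length ≤ row.length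
instance (targetGrid : List (List Int)) : Decidable (Pre_isPrintable targetGrid) := by
  unfold Pre_isPrintable; infer_instance

def pvWitness_isPrintable : List (List Int) := [[1, 2], [2, 1]]

def Spec_isPrintable (targetGrid : List (List Int)) (out : Bool) : Prop := out = isPrintable_alt targetGrid
instance (targetGrid : List (List Int)) (out : Bool) : Decidable (Spec_isPrintable targetGrid out) := by unfold Spec_isPrintable; infer_instance

-- ===== CLAIM (what is proved, stated in full; the proofs are below) =====
def Claim_equal_isPrintable : Prop := ∀ (targetGrid : List (List Int)), Dom_isPrintable targetGrid → Pre_isPrintable targetGrid → Spec_isPrintable targetGrid (isPrintable targetGrid)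

-- ===== LEMMAS AND PROOFS =====

-- ---------- generic fold lemmas ----------

theorem pv_foldl_inv {α σ : Type} (P : σ → Prop) (l : List α) (f : σ → α → σ)
    (hstep : ∀ s x, x ∈ l → P s → P (f s x)) :
    ∀ s, P s → P (l.foldl f s) := by
  induction l with
  | nil => intro s hs; exact hs
  | cons x xs ih =>
      intro s hs
      exact ih (fun s y hy => hstep s y (List.mem_cons_of_mem _ hy))
        (f s x) (hstep s x List.mem_cons_self hs)

theorem pv_foldl_rel {α σ τ : Type} (R : σ → τ → Prop) (l : List α)
    (f : σ → α → σ) (g : τ → α → τ)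
    (hstep : ∀ s t x, x ∈ l → R s t → R (f s x) (g t x)) :
    ∀ s t, R s t → R (l.foldl f s) (l.foldl g t) := by
  induction l with
  | nil => intro s t h; exact h
  | cons x xs ih =>
      intro s t h
      exact ih (fun s t y hy => hstep s t y (List.mem_cons_of_mem _ hy))
        (f s x) (g t x) (hstep s t x List.mem_cons_self h)

theorem pv_foldl_flatMap {α β σ : Type} (l : List α) (h : α → List β) (f : σ → β → σ) :
    ∀ s, (l.flatMap h).foldl f s = l.foldl (fun s x => (h x).foldl f s) s := by
  induction l with
  | nil => intro s; rfl
  | cons x xs ih => intro s; simp [List.flatMap_cons, List.foldl_append, ih]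

theorem pv_getD_foldl_insert_const {ν : Type} (V : List Int) (v0 dflt : ν) (c : Int) :
    ∀ (d : PySem.Dict Int ν),
      (V.foldl (fun d c => d.insert c v0) d).getD c dflt
        = if c ∈ V then v0 else d.getD c dflt := by
  induction V with
  | nil => intro d; simp
  | cons a V ih =>
      intro d
      rw [List.foldl_cons, ih]
      by_cases hc : c ∈ V <;> by_cases hca : c = a <;>
        simp [hc, hca, PySem.Dict.getD_insert]

theorem pv_length_lt_of_ssub (l l' : List Int) (h' : l'.Nodup)
    (hsub : l' ⊆ l) (x : Int) (hx : x ∈ l) (hx' : x ∉ l') : l'.length < l.length := by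
  rcases Nat.lt_or_ge l'.length l.length with h | h
  · exact h
  · exact absurd (((List.subperm_of_subset h' hsub).perm_of_length_le h).mem_iff.mpr hx) hx'

theorem pv_nodup_length_le (l l' : List Int) (h : l.Nodup) (hs : l ⊆ l') :
    l.length ≤ l'.length :=
  (List.subperm_of_subset h hs).length_le

theorem pv_eq_mem_of_nodup_length (l l' : List Int) (h : l.Nodup) (h' : l'.Nodup)
    (hs : l ⊆ l') (hlen : l'.length ≤ l.length) : ∀ x, x ∈ l ↔ x ∈ l' :=
  (List.perm_ext_iff_of_nodup h h').mp ((List.subperm_of_subset h hs).perm_of_length_le hlen)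

-- ---------- the spec-level graph ----------

def pvV (g : List (List Int)) : List Int := pvColorsA g

def pvBoxOf (g : List (List Int)) (c : Int) : Int × Int × Int × Int :=
  (pvBoxB g).getD c (0, 0, 0, 0)

def pvBCells (g : List (List Int)) (d : Int) : List (Int × Int) :=
  (PySem.List.pyRange (pvBoxOf g d).1 ((pvBoxOf g d).2.1 + 1) 1).flatMap
    (fun i => (PySem.List.pyRange (pvBoxOf g d).2.2.1 ((pvBoxOf g d).2.2.2 + 1) 1).map
      (fun j => (i, j)))

def pvEdgeb (g : List (List Int)) (d c : Int) : Bool :=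
  decide (d ∈ pvV g) && (c != d) && (pvBCells g d).any (fun q => pvCell g q.1 q.2 == c)

def pvStuckA (V : List Int) (adj : PySem.Dict Int (PySem.Set Int)) (R : List Int) : Prop :=
  R ≠ [] ∧ (∀ x ∈ R, x ∈ V) ∧ ∀ c ∈ R, ∃ d ∈ R, c ∈ adj.getD d PySem.Set.empty

-- ---------- colors ----------

theorem pv_colorsA_eq (g : List (List Int)) :
    pvColorsA g = PySem.Set.ofList g.flatten := by
  have aux : ∀ (rows : List (List Int)) (s : PySem.Set Int),
      rows.foldl (fun s row => row.foldl (fun s c => PySem.Set.add s c) s) s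
        = PySem.Set.update s rows.flatten := by
    intro rows
    induction rows with
    | nil => intro s; rfl
    | cons r rows ih =>
        intro s
        rw [List.foldl_cons, ih, List.flatten_cons, PySem.Set.update_append]
        rfl
  rw [pvColorsA, aux]
  rfl

theorem pv_colorsB_eq (g : List (List Int)) : pvColorsB g = pvColorsA g := by
  rw [pvColorsB, pv_colorsA_eq]

theorem pv_V_nodup (g : List (List Int)) : (pvV g).Nodup := by
  rw [pvV, pv_colorsA_eq]; exact PySem.Set.nodup_ofList (xs := g.flatten)

theorem pv_mem_V_iff (g : List (List Int)) (x : Int) :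
    x ∈ pvV g ↔ x ∈ g.flatten := by
  rw [pvV, pv_colorsA_eq]; exact PySem.Set.mem_ofList (xs := g.flatten) x

theorem pv_cell_mem (g : List (List Int)) (hpre : Pre_isPrintable g) (i j : Int)
    (hi : 0 ≤ i) (him : i < PySem.List.len g) (hj : 0 ≤ j)
    (hjn : j < PySem.List.len (PySem.List.pyGetD g 0 [])) : pvCell g i j ∈ pvV g := by
  obtain ⟨hne, hrows⟩ := hpre
  simp only [PySem.List.len_eq] at him hjn
  have hi' : i.toNat < g.length := by omega
  have hrow : PySem.List.pyGetD g i [] = g[i.toNat] :=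
    PySem.List.pyGetD_eq_getElem _ _ hi (by omega)
  have hrow0 : PySem.List.pyGetD g 0 [] = g.headD [] := by
    cases g with
    | nil => simp at hne
    | cons r rs => simp [PySem.List.pyGetD_zero_cons]
  have hlen : (g.headD []).length ≤ g[i.toNat].length :=
    hrows _ (List.getElem_mem hi')
  rw [hrow0] at hjn
  have hj' : j.toNat < g[i.toNat].length := by omega
  have hcell : pvCell g i j = g[i.toNat][j.toNat] := by
    rw [pvCell, hrow]
    exact PySem.List.pyGetD_eq_getElem _ _ hj (by omega)
  rw [hcell, pv_mem_V_iff]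
  exact List.mem_flatten.mpr ⟨g[i.toNat], List.getElem_mem hi', List.getElem_mem hj'⟩

-- ---------- bounding boxes ----------

def pvGoodBox (g : List (List Int)) (box : PySem.Dict Int (Int × Int × Int × Int)) : Prop :=
  ∀ c ∈ pvV g,
    (box.getD c (0,0,0,0) = ((10:Int) ^ 9, -((10:Int) ^ 9), (10:Int) ^ 9, -((10:Int) ^ 9))) ∨
    (0 ≤ (box.getD c (0,0,0,0)).1 ∧ (box.getD c (0,0,0,0)).2.1 < PySem.List.len g ∧
     0 ≤ (box.getD c (0,0,0,0)).2.2.1 ∧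
     (box.getD c (0,0,0,0)).2.2.2 < PySem.List.len (PySem.List.pyGetD g 0 []))

theorem pv_box_bounds (g : List (List Int)) (hpre : Pre_isPrintable g) :
    ∀ c ∈ pvV g,
    (pvBoxOf g c = ((10:Int) ^ 9, -((10:Int) ^ 9), (10:Int) ^ 9, -((10:Int) ^ 9))) ∨
    (0 ≤ (pvBoxOf g c).1 ∧ (pvBoxOf g c).2.1 < PySem.List.len g ∧
     0 ≤ (pvBoxOf g c).2.2.1 ∧ (pvBoxOf g c).2.2.2 < PySem.List.len (PySem.List.pyGetD g 0 [])) := by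
  have hmem : ∀ c, c ∈ pvColorsB g ↔ c ∈ pvV g := by
    intro c; rw [pv_colorsB_eq]; rfl
  suffices h : pvGoodBox g (pvBoxB g) by exact h
  rw [pvBoxB]
  refine pv_foldl_inv (P := pvGoodBox g) _ _
    (fun box i hi hbox => ?_) _ (fun c hc => ?_)
  · -- outer step: fold over columns
    refine pv_foldl_inv (P := pvGoodBox g) _ _ (fun box j hj hbox => ?_) _ hbox
    intro c hc
    rw [PySem.List.mem_pyRange_one] at hi hj
    have hcell : PySem.List.pyGetD (PySem.List.pyGetD g i []) j 0 ∈ pvV g :=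
      pv_cell_mem g hpre i j hi.1 hi.2 hj.1 hj.2
    rw [PySem.Dict.getD_insert]
    by_cases hcc : c = PySem.List.pyGetD (PySem.List.pyGetD g i []) j 0
    · subst hcc
      rcases hbox _ hc with h | h
      · right; rw [h]; simp only [min_def, max_def]
        split_ifs <;> simp_all <;> omega
      · right; simp only [min_def, max_def]
        split_ifs <;> simp_all
    · simp only [if_neg hcc]; exact hbox c hc
  · -- init
    rw [pv_getD_foldl_insert_const, if_pos ((hmem c).mpr hc)]
    left; rfl

theorem pv_bcells_bounds (g : List (List Int)) (hpre : Pre_isPrintable g) (d : Int)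
    (hd : d ∈ pvV g) :
    ∀ q ∈ pvBCells g d, 0 ≤ q.1 ∧ q.1 < PySem.List.len g ∧ 0 ≤ q.2 ∧
      q.2 < PySem.List.len (PySem.List.pyGetD g 0 []) := by
  intro q hq
  rw [pvBCells] at hq
  simp only [List.mem_flatMap, List.mem_map] at hq
  obtain ⟨i, hi, j, hj, rfl⟩ := hq
  rw [PySem.List.mem_pyRange_one] at hi hj
  rcases pv_box_bounds g hpre d hd with h | h
  · rw [h] at hi hj; simp at hi hj; omega
  · simp only at hi hj ⊢; omega

theorem pv_ite_insert_lt (d : PySem.Dict Int Int) (c' c v : Int) :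
    ((if v < d.getD c' 0 then d.insert c' v else d).getD c 0)
      = if c = c' then min (d.getD c' 0) v else d.getD c 0 := by
  by_cases hv : v < d.getD c' 0
  · rw [if_pos hv, PySem.Dict.getD_insert]
    by_cases hcc : c = c'
    · subst hcc; rw [if_pos rfl, if_pos rfl, min_def]; split_ifs <;> omega
    · rw [if_neg hcc, if_neg hcc]
  · rw [if_neg hv]
    by_cases hcc : c = c'
    · subst hcc; rw [if_pos rfl, min_def]; split_ifs <;> omega
    · rw [if_neg hcc]

theorem pv_ite_insert_gt (d : PySem.Dict Int Int) (c' c v : Int) :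
    ((if v > d.getD c' 0 then d.insert c' v else d).getD c 0)
      = if c = c' then max (d.getD c' 0) v else d.getD c 0 := by
  by_cases hv : v > d.getD c' 0
  · rw [if_pos hv, PySem.Dict.getD_insert]
    by_cases hcc : c = c'
    · subst hcc; rw [if_pos rfl, if_pos rfl, max_def]; split_ifs <;> omega
    · rw [if_neg hcc, if_neg hcc]
  · rw [if_neg hv]
    by_cases hcc : c = c'
    · subst hcc; rw [if_pos rfl, max_def]; split_ifs <;> omega
    · rw [if_neg hcc]

def pvBBEq (g : List (List Int)) (st : pvBB)
    (box : PySem.Dict Int (Int × Int × Int × Int)) : Prop :=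
  ∀ c ∈ pvV g,
    st.minr.getD c 0 = (box.getD c (0,0,0,0)).1 ∧
    st.maxr.getD c 0 = (box.getD c (0,0,0,0)).2.1 ∧
    st.minc.getD c 0 = (box.getD c (0,0,0,0)).2.2.1 ∧
    st.maxc.getD c 0 = (box.getD c (0,0,0,0)).2.2.2

theorem pv_bbox_rel (g : List (List Int)) (hpre : Pre_isPrintable g) :
    pvBBEq g (pvBBoxA g) (pvBoxB g) := by
  have hmem : ∀ c, c ∈ pvColorsB g ↔ c ∈ pvV g := by
    intro c; rw [pv_colorsB_eq]; rfl
  simp only [pvBBoxA, pvBoxB]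
  refine pv_foldl_rel (R := pvBBEq g) _ _ _ (fun st box i hi hR => ?_) _ _ ?_
  · refine pv_foldl_rel (R := pvBBEq g) _ _ _ (fun st box j hj hR => ?_) _ _ hR
    intro c hc
    rw [PySem.List.mem_pyRange_one] at hi hj
    have hcmem : PySem.List.pyGetD (PySem.List.pyGetD g i []) j 0 ∈ pvV g := by
      have := pv_cell_mem g hpre i j hi.1 hi.2 hj.1 hj.2
      rwa [pvCell] at this
    simp only [pvCell]
    obtain ⟨e1, e2, e3, e4⟩ := hR _ hcmem
    simp only [apply_ite pvBB.minr, apply_ite pvBB.maxr, apply_ite pvBB.minc,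
      apply_ite pvBB.maxc, ite_self]
    rw [pv_ite_insert_lt, pv_ite_insert_gt, pv_ite_insert_lt, pv_ite_insert_gt,
      PySem.Dict.getD_insert]
    by_cases hcc : c = PySem.List.pyGetD (PySem.List.pyGetD g i []) j 0
    · subst hcc
      rw [if_pos rfl, if_pos rfl, if_pos rfl, if_pos rfl, if_pos rfl,
        e1, e2, e3, e4]
      exact ⟨rfl, rfl, rfl, rfl⟩
    · rw [if_neg hcc, if_neg hcc, if_neg hcc, if_neg hcc, if_neg hcc]
      exact hR c hc
  · intro c hc
    rw [pv_getD_foldl_insert_const, pv_getD_foldl_insert_const,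
      pv_getD_foldl_insert_const]
    have hcA : c ∈ pvColorsA g := hc
    simp [hcA, (hmem c).mpr hc]

theorem pv_bbox_eq (g : List (List Int)) (hpre : Pre_isPrintable g) (c : Int) (hc : c ∈ pvV g) :
    (pvBBoxA g).minr.getD c 0 = (pvBoxOf g c).1 ∧
    (pvBBoxA g).maxr.getD c 0 = (pvBoxOf g c).2.1 ∧
    (pvBBoxA g).minc.getD c 0 = (pvBoxOf g c).2.2.1 ∧
    (pvBBoxA g).maxc.getD c 0 = (pvBoxOf g c).2.2.2 :=
  pv_bbox_rel g hpre c hc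

theorem pv_edge_props (g : List (List Int)) (hpre : Pre_isPrintable g) (d c : Int)
    (h : pvEdgeb g d c = true) : c ∈ pvV g ∧ c ≠ d ∧ d ∈ pvV g := by
  rw [pvEdgeb] at h
  simp only [Bool.and_eq_true, decide_eq_true_eq, bne_iff_ne, List.any_eq_true,
    beq_iff_eq] at h
  obtain ⟨⟨hd, hne⟩, q, hq, hcell⟩ := h
  obtain ⟨h1, h2, h3, h4⟩ := pv_bcells_bounds g hpre d hd q hq
  exact ⟨hcell ▸ pv_cell_mem g hpre q.1 q.2 h1 h2 h3 h4, hne, hd⟩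

-- ---------- adjacency / indegree construction (port A) ----------

theorem pv_foldl_prefix_inv {α σ : Type} (Q : List α → σ → Prop) (l : List α) (f : σ → α → σ)
    (hstep : ∀ (P : List α) (x : α) (suffix : List α) (s : σ),
      l = P ++ x :: suffix → Q P s → Q (P ++ [x]) (f s x)) :
    ∀ (suffix P : List α) (s : σ), l = P ++ suffix → Q P s → Q (P ++ suffix) (suffix.foldl f s) := by
  intro suffix
  induction suffix with
  | nil => intro P s h hQ; simpa using hQ
  | cons x xs ih =>
      intro P s h hQ
      have h2 : l = (P ++ [x]) ++ xs := by simpa using h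
      have h3 := ih (P ++ [x]) (f s x) h2 (hstep P x xs s h hQ)
      simpa using h3

def pvStepA (g : List (List Int)) (d0 : Int)
    (p : PySem.Dict Int (PySem.Set Int) × PySem.Dict Int Int) (q : Int × Int) :
    PySem.Dict Int (PySem.Set Int) × PySem.Dict Int Int :=
  let d := pvCell g q.1 q.2
  let adjc := p.1.getD d0 PySem.Set.empty
  if d ≠ d0 ∧ ¬ d ∈ adjc then
    (p.1.insert d0 (PySem.Set.add adjc d), p.2.modify d 0 (· + 1))
  else p

theorem pv_adj_inner (g : List (List Int)) (d0 : Int) (L : List (Int × Int)) :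
    ∀ p,
      (∀ c, c ∈ (L.foldl (pvStepA g d0) p).1.getD d0 PySem.Set.empty ↔
          (c ∈ p.1.getD d0 PySem.Set.empty ∨ (c ≠ d0 ∧ ∃ q ∈ L, pvCell g q.1 q.2 = c))) ∧
      (∀ k, k ≠ d0 →
        (L.foldl (pvStepA g d0) p).1.getD k PySem.Set.empty = p.1.getD k PySem.Set.empty) ∧
      ((p.1.getD d0 PySem.Set.empty).Nodup →
        ((L.foldl (pvStepA g d0) p).1.getD d0 PySem.Set.empty).Nodup) ∧
      (∀ c, (L.foldl (pvStepA g d0) p).2.getD c 0 = p.2.getD c 0 +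
        (if c ∈ (L.foldl (pvStepA g d0) p).1.getD d0 PySem.Set.empty ∧
            c ∉ p.1.getD d0 PySem.Set.empty then 1 else 0)) := by
  induction L with
  | nil =>
      intro p
      refine ⟨fun c => by simp, fun k _ => rfl, fun h => h, fun c => by simp⟩
  | cons q0 L ih =>
      intro p
      rw [List.foldl_cons]
      by_cases hcond : pvCell g q0.1 q0.2 ≠ d0 ∧
          ¬ pvCell g q0.1 q0.2 ∈ p.1.getD d0 PySem.Set.empty
      · have hstep : pvStepA g d0 p q0 =
            (p.1.insert d0 (PySem.Set.add (p.1.getD d0 PySem.Set.empty) (pvCell g q0.1 q0.2)),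
             p.2.modify (pvCell g q0.1 q0.2) 0 (· + 1)) := by
          rw [pvStepA]; exact if_pos hcond
        obtain ⟨i1, i2, i3, i4⟩ := ih (pvStepA g d0 p q0)
        rw [hstep] at i1 i2 i3 i4
        have hset : (p.1.insert d0 (PySem.Set.add (p.1.getD d0 PySem.Set.empty)
            (pvCell g q0.1 q0.2))).getD d0 PySem.Set.empty
            = PySem.Set.add (p.1.getD d0 PySem.Set.empty) (pvCell g q0.1 q0.2) := by
          rw [PySem.Dict.getD_insert, if_pos rfl]
        have hsetk : ∀ k, k ≠ d0 → (p.1.insert d0 (PySem.Set.add (p.1.getD d0 PySem.Set.empty)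
            (pvCell g q0.1 q0.2))).getD k PySem.Set.empty = p.1.getD k PySem.Set.empty := by
          intro k hk; rw [PySem.Dict.getD_insert, if_neg hk]
        rw [hstep]
        refine ⟨?_, ?_, ?_, ?_⟩
        · intro c
          rw [i1 c, hset, PySem.Set.mem_add, List.exists_mem_cons_iff]
          constructor
          · rintro ((h | h) | ⟨hne, hex⟩)
            · exact Or.inl h
            · exact Or.inr ⟨by rw [h]; exact hcond.1, Or.inl h.symm⟩
            · exact Or.inr ⟨hne, Or.inr hex⟩
          · rintro (h | ⟨hne, (h | hex)⟩)
            · exact Or.inl (Or.inl h)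
            · exact Or.inl (Or.inr h.symm)
            · exact Or.inr ⟨hne, hex⟩
        · intro k hk
          rw [i2 k hk, hsetk k hk]
        · intro hnd
          exact i3 (by rw [hset]; exact PySem.Set.nodup_add _ _ hnd)
        · intro c
          rw [i4 c, hset]
          simp only [PySem.Dict.getD_modify]
          by_cases hc : c = pvCell g q0.1 q0.2
          · rw [if_pos hc]
            have hin : c ∈ (L.foldl (pvStepA g d0)
                (p.1.insert d0 (PySem.Set.add (p.1.getD d0 PySem.Set.empty) (pvCell g q0.1 q0.2)),
                 p.2.modify (pvCell g q0.1 q0.2) 0 (· + 1))).1.getD d0 PySem.Set.empty := by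
              rw [i1 c, hset]
              exact Or.inl ((PySem.Set.mem_add _ _ _).mpr (Or.inr hc))
            rw [if_neg (fun hx => hx.2 ((PySem.Set.mem_add _ _ _).mpr (Or.inr hc))),
              if_pos ⟨hin, by rw [hc]; exact hcond.2⟩, hc]
            ring
          · rw [if_neg hc]
            have hmemadd : (c ∈ PySem.Set.add (p.1.getD d0 PySem.Set.empty)
                (pvCell g q0.1 q0.2)) ↔ c ∈ p.1.getD d0 PySem.Set.empty := by
              rw [PySem.Set.mem_add]
              exact ⟨fun h => h.elim id (fun he => absurd he hc), Or.inl⟩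
            simp only [hmemadd]
      · have hstep : pvStepA g d0 p q0 = p := by
          rw [pvStepA]; exact if_neg hcond
        obtain ⟨i1, i2, i3, i4⟩ := ih (pvStepA g d0 p q0)
        rw [hstep] at i1 i2 i3 i4
        rw [hstep]
        rw [not_and, not_not] at hcond
        refine ⟨?_, i2, i3, i4⟩
        intro c
        rw [i1 c, List.exists_mem_cons_iff]
        constructor
        · rintro (h | ⟨hne, hex⟩)
          · exact Or.inl h
          · exact Or.inr ⟨hne, Or.inr hex⟩
        · rintro (h | ⟨hne, (h | hex)⟩)
          · exact Or.inl h
          · refine Or.inl ?_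
            rw [← h]
            exact hcond (by rw [h]; exact hne)
          · exact Or.inr ⟨hne, hex⟩

-- ---------- assembled characterizations of both graph constructions ----------

theorem pv_foldl_prefix_inv' {α σ : Type} (Q : List α → σ → Prop) (l : List α) (f : σ → α → σ)
    (hstep : ∀ (P : List α) (x : α) (suffix : List α) (s : σ),
      l = P ++ x :: suffix → Q P s → Q (P ++ [x]) (f s x))
    (s : σ) (h0 : Q [] s) : Q l (l.foldl f s) := by
  simpa using pv_foldl_prefix_inv Q l f hstep l [] s rfl h0

theorem pv_adj_shape (g : List (List Int)) (x : Int)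
    (s : PySem.Dict Int (PySem.Set Int) × PySem.Dict Int Int) :
    (pvBCells g x).foldl (pvStepA g x) s =
    (PySem.List.pyRange (pvBoxOf g x).1 ((pvBoxOf g x).2.1 + 1) 1).foldl
      (fun p i => (PySem.List.pyRange (pvBoxOf g x).2.2.1 ((pvBoxOf g x).2.2.2 + 1) 1).foldl
        (fun p j =>
          let d := pvCell g i j
          let adjc := p.1.getD x PySem.Set.empty
          if d ≠ x ∧ ¬ d ∈ adjc then
            (p.1.insert x (PySem.Set.add adjc d), p.2.modify d 0 (· + 1))
          else p) p) s := by
  rw [pvBCells, pv_foldl_flatMap]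
  simp only [List.foldl_map]
  rfl

def pvQA (g : List (List Int)) (P : List Int)
    (p : PySem.Dict Int (PySem.Set Int) × PySem.Dict Int Int) : Prop :=
  (∀ d ∈ P, ∀ c, (c ∈ p.1.getD d PySem.Set.empty ↔ pvEdgeb g d c = true)) ∧
  (∀ d, d ∉ P → p.1.getD d PySem.Set.empty = PySem.Set.empty) ∧
  (∀ d, (p.1.getD d PySem.Set.empty).Nodup) ∧
  (∀ c, p.2.getD c 0 =
    ((P.filter (fun d => decide (c ∈ p.1.getD d PySem.Set.empty))).length : Int))

theorem pv_edgeb_iff (g : List (List Int)) (x : Int) (hx : x ∈ pvV g) (c : Int) :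
    pvEdgeb g x c = true ↔ (c ≠ x ∧ ∃ q ∈ pvBCells g x, pvCell g q.1 q.2 = c) := by
  simp [pvEdgeb, hx]

theorem pv_adjind_spec (g : List (List Int)) (hpre : Pre_isPrintable g) :
    (∀ d c, c ∈ ((pvAdjIndA g).1.getD d PySem.Set.empty) ↔ pvEdgeb g d c = true) ∧
    (∀ d, ((pvAdjIndA g).1.getD d PySem.Set.empty).Nodup) ∧
    (∀ c, (pvAdjIndA g).2.getD c 0 =
      (((pvV g).filter (fun d => decide (c ∈ (pvAdjIndA g).1.getD d PySem.Set.empty))).length : Int)) := by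
  have hVnd : (pvV g).Nodup := pv_V_nodup g
  have key : pvQA g (pvV g) (pvAdjIndA g) := by
    unfold pvAdjIndA
    refine pv_foldl_prefix_inv' (Q := pvQA g) _ _ ?hstep _ ?hinit
    case hinit =>
      refine ⟨fun d hd => absurd hd List.not_mem_nil, fun d _ => by
        rw [PySem.Dict.getD_empty], fun d => by
        rw [PySem.Dict.getD_empty]; exact List.nodup_nil, fun c => by
        rw [pv_getD_foldl_insert_const]
        split_ifs <;> simp [PySem.Dict.getD_empty]⟩
    case hstep =>
      intro P x suffix s hsplit hQ
      obtain ⟨q1, q2, q3, q4⟩ := hQ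
      have hx : x ∈ pvV g := by
        rw [hsplit]
        exact List.mem_append_right _ List.mem_cons_self
      have hxP : x ∉ P := by
        have hnd : (P ++ x :: suffix).Nodup := hsplit ▸ hVnd
        have hdisj := (List.nodup_append.mp hnd).2.2
        intro hmem
        exact hdisj x hmem x List.mem_cons_self rfl
      obtain ⟨b1, b2, b3, b4⟩ := pv_bbox_eq g hpre x hx
      rw [b1, b2, b3, b4, ← pv_adj_shape g x s]
      obtain ⟨j1, j2, j3, j4⟩ := pv_adj_inner g x (pvBCells g x) s
      have hs0 : s.1.getD x PySem.Set.empty = PySem.Set.empty := q2 x hxP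
      refine ⟨?_, ?_, ?_, ?_⟩
      · intro d hd c
        rcases List.mem_append.mp hd with hdP | hdx
        · have hdx : d ≠ x := fun he => hxP (he ▸ hdP)
          rw [j2 d hdx]
          exact q1 d hdP c
        · have hdx : d = x := List.mem_singleton.mp hdx
          subst hdx
          rw [j1 c, hs0, pv_edgeb_iff g d hx c]
          simp [PySem.Set.empty]
      · intro d hd
        have hdP : d ∉ P := fun h => hd (List.mem_append_left _ h)
        have hdx : d ≠ x := fun he => hd (List.mem_append_right _ (he ▸ List.mem_singleton_self x))
        rw [j2 d hdx]
        exact q2 d hdP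
      · intro d
        by_cases hdx : d = x
        · subst hdx
          refine j3 ?_
          rw [hs0]
          exact List.nodup_nil
        · rw [j2 d hdx]
          exact q3 d
      · intro c
        rw [j4 c, q4 c, List.filter_append, List.length_append]
        have hfeq : P.filter (fun d => decide (c ∈
              ((pvBCells g x).foldl (pvStepA g x) s).1.getD d PySem.Set.empty))
            = P.filter (fun d => decide (c ∈ s.1.getD d PySem.Set.empty)) :=
          List.filter_congr (fun d hdP => by
            rw [j2 d (fun he => hxP (he ▸ hdP))])
        rw [List.filter_singleton, hfeq]
        by_cases hcx : c ∈ ((pvBCells g x).foldl (pvStepA g x) s).1.getD x PySem.Set.empty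
        · rw [if_pos ⟨hcx, by rw [hs0]; exact List.not_mem_nil⟩]
          simp only [hcx, decide_true, cond_true, List.length_singleton]
          push_cast
          ring
        · rw [if_neg (fun hx2 => hcx hx2.1)]
          simp only [hcx, decide_false, cond_false, List.length_nil]
          push_cast
          ring
  refine ⟨?_, key.2.2.1, key.2.2.2⟩
  intro d c
  by_cases hd : d ∈ pvV g
  · exact key.1 d hd c
  · rw [key.2.1 d hd]
    constructor
    · intro h
      exact absurd h (by simp [PySem.Set.empty])
    · intro h
      have := (pv_edge_props g hpre d c h).2.2
      exact absurd this hd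

def pvStepB (g : List (List Int)) (d0 : Int) (pr : PySem.Dict Int (PySem.Set Int))
    (q : Int × Int) : PySem.Dict Int (PySem.Set Int) :=
  let c := pvCell g q.1 q.2
  if c ≠ d0 then pr.insert c (PySem.Set.add (pr.getD c PySem.Set.empty) d0) else pr

theorem pv_preds_shape (g : List (List Int)) (x : Int)
    (pr : PySem.Dict Int (PySem.Set Int)) :
    (pvBCells g x).foldl (pvStepB g x) pr =
    (PySem.List.pyRange ((pvBoxB g).getD x (0,0,0,0)).1
        (((pvBoxB g).getD x (0,0,0,0)).2.1 + 1) 1).foldl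
      (fun pr i => (PySem.List.pyRange ((pvBoxB g).getD x (0,0,0,0)).2.2.1
          (((pvBoxB g).getD x (0,0,0,0)).2.2.2 + 1) 1).foldl
        (fun pr j =>
          let c := pvCell g i j
          if c ≠ x then pr.insert c (PySem.Set.add (pr.getD c PySem.Set.empty) x) else pr) pr) pr := by
  rw [pvBCells, pv_foldl_flatMap]
  simp only [List.foldl_map]
  rfl

theorem pv_preds_inner (g : List (List Int)) (d0 : Int) (L : List (Int × Int)) :
    ∀ pr c x,
      x ∈ (L.foldl (pvStepB g d0) pr).getD c PySem.Set.empty ↔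
        (x ∈ pr.getD c PySem.Set.empty ∨
          (x = d0 ∧ c ≠ d0 ∧ ∃ q ∈ L, pvCell g q.1 q.2 = c)) := by
  induction L with
  | nil => intro pr c x; simp
  | cons q0 L ih =>
      intro pr c x
      rw [List.foldl_cons]
      by_cases hcond : pvCell g q0.1 q0.2 ≠ d0
      · have hstep : pvStepB g d0 pr q0 = pr.insert (pvCell g q0.1 q0.2)
            (PySem.Set.add (pr.getD (pvCell g q0.1 q0.2) PySem.Set.empty) d0) := by
          rw [pvStepB]; exact if_pos hcond
        rw [hstep, ih, List.exists_mem_cons_iff, PySem.Dict.getD_insert]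
        by_cases hcc : c = pvCell g q0.1 q0.2
        · subst hcc
          rw [if_pos rfl, PySem.Set.mem_add]
          constructor
          · rintro ((h | h) | ⟨h1, h2, hex⟩)
            · exact Or.inl h
            · exact Or.inr ⟨h, hcond, Or.inl rfl⟩
            · exact Or.inr ⟨h1, h2, Or.inr hex⟩
          · rintro (h | ⟨h1, h2, (h | hex)⟩)
            · exact Or.inl (Or.inl h)
            · exact Or.inl (Or.inr h1)
            · exact Or.inr ⟨h1, h2, hex⟩
        · rw [if_neg hcc]
          constructor
          · rintro (h | ⟨h1, h2, hex⟩)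
            · exact Or.inl h
            · exact Or.inr ⟨h1, h2, Or.inr hex⟩
          · rintro (h | ⟨h1, h2, (h | hex)⟩)
            · exact Or.inl h
            · exact absurd h.symm hcc
            · exact Or.inr ⟨h1, h2, hex⟩
      · have hstep : pvStepB g d0 pr q0 = pr := by
          rw [pvStepB]; exact if_neg hcond
        rw [hstep, ih, List.exists_mem_cons_iff]
        rw [not_not] at hcond
        constructor
        · rintro (h | ⟨h1, h2, hex⟩)
          · exact Or.inl h
          · exact Or.inr ⟨h1, h2, Or.inr hex⟩
        · rintro (h | ⟨h1, h2, (h | hex)⟩)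
          · exact Or.inl h
          · exact absurd (h ▸ hcond) h2
          · exact Or.inr ⟨h1, h2, hex⟩

def pvQB (g : List (List Int)) (P : List Int)
    (pr : PySem.Dict Int (PySem.Set Int)) : Prop :=
  ∀ c x, x ∈ pr.getD c PySem.Set.empty ↔ (x ∈ P ∧ pvEdgeb g x c = true)

theorem pv_preds_spec (g : List (List Int)) (hpre : Pre_isPrintable g) :
    ∀ c x, x ∈ ((pvPredsB g).getD c PySem.Set.empty) ↔ pvEdgeb g x c = true := by
  have hVnd : (pvV g).Nodup := pv_V_nodup g
  have hmemB : ∀ y, y ∈ pvColorsB g ↔ y ∈ pvV g := by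
    intro y; rw [pv_colorsB_eq]; rfl
  have key : pvQB g (pvColorsB g) (pvPredsB g) := by
    unfold pvPredsB
    refine pv_foldl_prefix_inv' (Q := pvQB g) _ _ ?hstep _ ?hinit
    case hinit =>
      intro c x
      rw [pv_getD_foldl_insert_const]
      constructor
      · intro h
        split_ifs at h <;> simp [PySem.Set.empty, PySem.Dict.getD_empty] at h
      · rintro ⟨h, -⟩
        exact absurd h List.not_mem_nil
    case hstep =>
      intro P y suffix pr hsplit hQ
      have hy : y ∈ pvV g := (hmemB y).mp (by
        rw [hsplit]; exact List.mem_append_right _ List.mem_cons_self)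
      have hyP : y ∉ P := by
        have hnd : (P ++ y :: suffix).Nodup := by
          have h2 : (pvColorsB g).Nodup := by
            rw [pv_colorsB_eq]; exact hVnd
          rwa [hsplit] at h2
        have hdisj := (List.nodup_append.mp hnd).2.2
        intro hmem
        exact hdisj y hmem y List.mem_cons_self rfl
      rw [← pv_preds_shape g y pr]
      intro c x
      rw [pv_preds_inner g y (pvBCells g y) pr c x, hQ c x]
      constructor
      · rintro (⟨h1, h2⟩ | ⟨h1, h2, h3⟩)
        · exact ⟨List.mem_append_left _ h1, h2⟩
        · subst h1
          exact ⟨List.mem_append_right _ (List.mem_singleton_self x),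
            (pv_edgeb_iff g x hy c).mpr ⟨h2, h3⟩⟩
      · rintro ⟨h1, h2⟩
        rcases List.mem_append.mp h1 with h1 | h1
        · exact Or.inl ⟨h1, h2⟩
        · have hxy : x = y := List.mem_singleton.mp h1
          subst hxy
          have h3 := (pv_edgeb_iff g x hy c).mp h2
          exact Or.inr ⟨rfl, h3.1, h3.2⟩
  intro c x
  rw [key c x]
  constructor
  · rintro ⟨-, h⟩
    exact h
  · intro h
    exact ⟨(hmemB x).mpr (pv_edge_props g hpre x c h).2.2, h⟩

-- ---------- Kahn loop (port A) ----------

def pvTopo (V : List Int) (adj : PySem.Dict Int (PySem.Set Int)) (P : List Int) : Prop :=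
  ∀ p1 c p2, P = p1 ++ c :: p2 → ∀ d ∈ V, c ∈ adj.getD d PySem.Set.empty → d ∈ p1

theorem pv_topo_not_mem_stuck (V : List Int) (adj : PySem.Dict Int (PySem.Set Int))
    (P R : List Int) (hT : pvTopo V adj P) (hR : pvStuckA V adj R) :
    ∀ x ∈ P, x ∉ R := by
  have main : ∀ k, ∀ (hk : k < P.length), P[k] ∉ R := by
    intro k
    induction k using Nat.strong_induction_on with
    | _ k ihk =>
      intro hk hmemR
      obtain ⟨d, hdR, hedge⟩ := hR.2.2 _ hmemR
      have hdV : d ∈ V := hR.2.1 d hdR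
      have hdec : P = P.take k ++ P[k] :: P.drop (k + 1) := by
        conv_lhs => rw [← List.take_append_drop k P]
        rw [List.drop_eq_getElem_cons hk]
      have hd1 : d ∈ P.take k := hT _ _ _ hdec d hdV hedge
      obtain ⟨j, hj, hjd⟩ := List.mem_iff_getElem.mp hd1
      rw [List.getElem_take] at hjd
      have hjk : j < k := lt_of_lt_of_le hj (by simp [List.length_take])
      exact ihk j hjk (by omega) (hjd ▸ hdR)
  intro x hx hxR
  obtain ⟨k, hk, rfl⟩ := List.mem_iff_getElem.mp hx
  exact main k hk hxR

def pvInv (V : List Int) (adj : PySem.Dict Int (PySem.Set Int))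
    (Popped q : List Int) (ind : PySem.Dict Int Int) : Prop :=
  (Popped ++ q).Nodup ∧ (∀ x ∈ Popped ++ q, x ∈ V) ∧
  (∀ c, ind.getD c 0 =
    ((V.filter (fun d => !decide (d ∈ Popped) && decide (c ∈ adj.getD d PySem.Set.empty))).length : Int)) ∧
  pvTopo V adj Popped ∧
  (∀ c ∈ q, ∀ d ∈ V, c ∈ adj.getD d PySem.Set.empty → d ∈ Popped) ∧
  (∀ c ∈ V, (∀ d ∈ V, c ∈ adj.getD d PySem.Set.empty → d ∈ Popped) → (c ∈ Popped ∨ c ∈ q))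

theorem pv_dec_fold (L : List Int) (hL : L.Nodup) :
    ∀ (q : List Int) (ind : PySem.Dict Int Int) (gf : Int → Int), (∀ c, ind.getD c 0 = gf c) →
    (L.foldl (fun (st : List Int × PySem.Dict Int Int) v =>
        let ind' := st.2.modify v 0 (· - 1)
        if ind'.getD v 0 = 0 then (st.1 ++ [v], ind') else (st.1, ind')) (q, ind)).1
      = q ++ L.filter (fun v => decide (gf v = 1)) ∧
    ∀ c, (L.foldl (fun (st : List Int × PySem.Dict Int Int) v =>
        let ind' := st.2.modify v 0 (· - 1)
        if ind'.getD v 0 = 0 then (st.1 ++ [v], ind') else (st.1, ind')) (q, ind)).2.getD c 0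
      = if c ∈ L then gf c - 1 else gf c := by
  revert hL
  induction L with
  | nil =>
      intro _ q ind gf h
      refine ⟨by simp, fun c => by simpa using h c⟩
  | cons v L ih =>
      intro hL q ind gf h
      obtain ⟨hv, hL'⟩ := List.nodup_cons.mp hL
      have hm : ∀ c, (ind.modify v 0 (fun x => x - 1)).getD c 0
          = if c = v then gf v - 1 else gf c := by
        intro c
        rw [PySem.Dict.getD_modify]
        by_cases hc : c = v
        · simp [hc, h v]
        · simp [hc, h c]
      have hfc : ∀ (q' : List Int) (ind' : PySem.Dict Int Int),
          (∀ c, PySem.Dict.getD ind' c 0 = if c = v then gf v - 1 else gf c) →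
          (L.foldl (fun (st : List Int × PySem.Dict Int Int) v =>
            let ind' := st.2.modify v 0 (· - 1)
            if ind'.getD v 0 = 0 then (st.1 ++ [v], ind') else (st.1, ind')) (q', ind')).1
            = q' ++ L.filter (fun x => decide (gf x = 1)) ∧
          ∀ c, (L.foldl (fun (st : List Int × PySem.Dict Int Int) v =>
            let ind' := st.2.modify v 0 (· - 1)
            if ind'.getD v 0 = 0 then (st.1 ++ [v], ind') else (st.1, ind')) (q', ind')).2.getD c 0
            = if c ∈ L then (if c = v then gf v - 1 else gf c) - 1
              else (if c = v then gf v - 1 else gf c) := by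
        intro q' ind' h'
        obtain ⟨ih1, ih2⟩ := ih hL' q' ind' (fun c => if c = v then gf v - 1 else gf c) h'
        constructor
        · rw [ih1]
          congr 1
          refine List.filter_congr (fun x hx => ?_)
          have hxv : x ≠ v := fun he => hv (he ▸ hx)
          simp [hxv]
        · exact ih2
      rw [List.foldl_cons]
      simp only
      by_cases hv0 : (ind.modify v 0 (fun x => x - 1)).getD v 0 = 0
      · rw [if_pos hv0]
        obtain ⟨r1, r2⟩ := hfc (q ++ [v]) _ hm
        have hgv : gf v = 1 := by have h1 := hm v; rw [if_pos rfl] at h1; omega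
        constructor
        · rw [r1, List.filter_cons]
          simp [hgv]
        · intro c
          rw [r2 c]
          by_cases hc : c = v
          · subst hc
            simp [hv]
          · simp [hc, List.mem_cons]
      · rw [if_neg hv0]
        obtain ⟨r1, r2⟩ := hfc q _ hm
        have hgv : ¬ gf v = 1 := by have h1 := hm v; rw [if_pos rfl] at h1; omega
        constructor
        · rw [r1, List.filter_cons]
          simp [hgv]
        · intro c
          rw [r2 c]
          by_cases hc : c = v
          · subst hc
            simp [hv]
          · simp [hc, List.mem_cons]

theorem pv_kahn_final (V : List Int) (adj : PySem.Dict Int (PySem.Set Int))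
    (Popped : List Int) (ind : PySem.Dict Int Int)
    (hInv : pvInv V adj Popped [] ind) :
    Popped.Nodup ∧ (∀ x ∈ Popped, x ∈ V) ∧ pvTopo V adj Popped ∧
    (∀ c ∈ V, c ∉ Popped → ∃ d ∈ V, c ∈ adj.getD d PySem.Set.empty ∧ d ∉ Popped) := by
  obtain ⟨hnd, hmemV, _, htopo, _, hcomplete⟩ := hInv
  refine ⟨by simpa using hnd, fun x hx => hmemV x (by simpa using hx), htopo, ?_⟩
  intro c hc hnc
  by_contra hno
  rw [not_exists] at hno
  simp only [not_and, not_not] at hno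
  rcases hcomplete c hc (fun d hd he => hno d hd he) with h | h
  · exact hnc h
  · exact absurd h List.not_mem_nil

theorem pv_kahn_run (V : List Int) (adj : PySem.Dict Int (PySem.Set Int))
    (hV : V.Nodup)
    (hadj : ∀ d c, c ∈ adj.getD d PySem.Set.empty → c ∈ V ∧ c ≠ d ∧ d ∈ V)
    (hnd : ∀ d, (adj.getD d PySem.Set.empty).Nodup) :
    ∀ (fuel : Nat) (Popped q : List Int) (ind : PySem.Dict Int Int),
      pvInv V adj Popped q ind → V.length + 1 ≤ fuel + Popped.length →
      ∃ P' : List Int,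
        pvKahnLoopA adj fuel q ind (Popped.length : Int) = (P'.length : Int) ∧
        P'.Nodup ∧ (∀ x ∈ P', x ∈ V) ∧ pvTopo V adj P' ∧
        (∀ c ∈ V, c ∉ P' → ∃ d ∈ V, c ∈ adj.getD d PySem.Set.empty ∧ d ∉ P') := by
  intro fuel
  induction fuel with
  | zero =>
      intro Popped q ind hInv hfuel
      cases q with
      | nil =>
          obtain ⟨h1, h2, h3, h4⟩ := pv_kahn_final V adj Popped ind hInv
          exact ⟨Popped, rfl, h1, h2, h3, h4⟩
      | cons u rest =>
          exfalso
          have hle : (Popped ++ u :: rest).length ≤ V.length :=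
            pv_nodup_length_le _ _ hInv.1 (fun x hx => hInv.2.1 x hx)
          simp [List.length_append] at hle
          omega
  | succ fuel ih =>
      intro Popped q ind hInv hfuel
      cases q with
      | nil =>
          obtain ⟨h1, h2, h3, h4⟩ := pv_kahn_final V adj Popped ind hInv
          exact ⟨Popped, rfl, h1, h2, h3, h4⟩
      | cons u rest =>
          obtain ⟨hnodup, hmemV, hind, htopo, hqinv, hcomplete⟩ := hInv
          have huV : u ∈ V := hmemV u (List.mem_append_right _ List.mem_cons_self)
          have huP : u ∉ Popped := by
            have hdisj := (List.nodup_append.mp hnodup).2.2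
            intro hu
            exact hdisj u hu u List.mem_cons_self rfl
          set L := adj.getD u PySem.Set.empty with hLdef
          set gf := fun c => ((V.filter (fun d => !decide (d ∈ Popped) &&
              decide (c ∈ adj.getD d PySem.Set.empty))).length : Int) with hgfdef
          obtain ⟨hq', hind'⟩ := pv_dec_fold L (hnd u) rest ind gf hind
          set gf' := fun c => ((V.filter (fun d => !decide (d ∈ Popped ++ [u]) &&
              decide (c ∈ adj.getD d PySem.Set.empty))).length : Int) with hgf'def
          have keyarith : ∀ c, gf' c = if c ∈ L then gf c - 1 else gf c := by
            intro c
            have hsf : V.filter (fun d => !decide (d ∈ Popped ++ [u]) &&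
                decide (c ∈ adj.getD d PySem.Set.empty))
                = (V.filter (fun d => !decide (d ∈ Popped) &&
                    decide (c ∈ adj.getD d PySem.Set.empty))).filter (fun d => !decide (d = u)) := by
              rw [List.filter_filter]
              refine List.filter_congr (fun d hd => ?_)
              by_cases h1 : d ∈ Popped <;> by_cases h2 : d = u <;>
                by_cases h3 : c ∈ adj.getD d PySem.Set.empty <;>
                  simp [h1, h2, List.mem_append]
            by_cases hcL : c ∈ L
            · have huf : u ∈ V.filter (fun d => !decide (d ∈ Popped) &&
                  decide (c ∈ adj.getD d PySem.Set.empty)) :=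
                List.mem_filter.mpr ⟨huV, by
                  have hcLe : c ∈ adj.getD u PySem.Set.empty := hcL
                  simp [huP]
                  exact hcLe⟩
              have hfnd : (V.filter (fun d => !decide (d ∈ Popped) &&
                  decide (c ∈ adj.getD d PySem.Set.empty))).Nodup := hV.filter _
              have herase : (V.filter (fun d => !decide (d ∈ Popped) &&
                  decide (c ∈ adj.getD d PySem.Set.empty))).filter (fun d => !decide (d = u))
                  = (V.filter (fun d => !decide (d ∈ Popped) &&
                      decide (c ∈ adj.getD d PySem.Set.empty))).erase u := by
                rw [hfnd.erase_eq_filter u]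
                exact List.filter_congr (fun d _ => by by_cases h : d = u <;> simp [h])
              have hlen1 : 1 ≤ (V.filter (fun d => !decide (d ∈ Popped) &&
                  decide (c ∈ adj.getD d PySem.Set.empty))).length :=
                List.length_pos_of_mem huf
              rw [hgf'def, hgfdef]
              simp only [hsf, herase, if_pos hcL]
              rw [List.length_erase_of_mem huf]
              omega
            · have hsame : (V.filter (fun d => !decide (d ∈ Popped) &&
                  decide (c ∈ adj.getD d PySem.Set.empty))).filter (fun d => !decide (d = u))
                  = V.filter (fun d => !decide (d ∈ Popped) &&
                      decide (c ∈ adj.getD d PySem.Set.empty)) := by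
                refine List.filter_eq_self.mpr (fun d hd => ?_)
                have hd2 := (List.mem_filter.mp hd).2
                simp only [Bool.and_eq_true, Bool.not_eq_true', decide_eq_false_iff_not,
                  decide_eq_true_eq] at hd2
                simp only [Bool.not_eq_true', decide_eq_false_iff_not]
                intro he
                rw [he] at hd2
                exact hcL (hLdef ▸ hd2.2)
              rw [hgf'def, hgfdef]
              simp only [hsf, hsame, if_neg hcL]
          have hzero : ∀ c, gf' c = 0 →
              ∀ d ∈ V, c ∈ adj.getD d PySem.Set.empty → d ∈ Popped ++ [u] := by
            intro c h0 d hdV hedge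
            by_contra hdP
            have hdf : d ∈ V.filter (fun d => !decide (d ∈ Popped ++ [u]) &&
                decide (c ∈ adj.getD d PySem.Set.empty)) :=
              List.mem_filter.mpr ⟨hdV, by simp [hdP]; exact hedge⟩
            rw [hgf'def] at h0
            simp only at h0
            have : (V.filter (fun d => !decide (d ∈ Popped ++ [u]) &&
                decide (c ∈ adj.getD d PySem.Set.empty))).length = 0 := by omega
            rw [List.length_eq_zero_iff] at this
            rw [this] at hdf
            exact List.not_mem_nil hdf
          have hzero' : ∀ c, (∀ d ∈ V, c ∈ adj.getD d PySem.Set.empty → d ∈ Popped ++ [u]) →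
              gf' c = 0 := by
            intro c hall
            rw [hgf'def]
            simp only
            have : V.filter (fun d => !decide (d ∈ Popped ++ [u]) &&
                decide (c ∈ adj.getD d PySem.Set.empty)) = [] := by
              rw [List.filter_eq_nil_iff]
              intro d hdV
              simp only [Bool.and_eq_true, Bool.not_eq_true', decide_eq_false_iff_not,
                decide_eq_true_eq, not_and]
              intro hdP hedge
              exact hdP (hall d hdV hedge)
            rw [this]
            rfl
          set newly := L.filter (fun v => decide (gf v = 1)) with hnewdef
          have hnewmem : ∀ v, v ∈ newly → v ∈ L ∧ gf v = 1 := by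
            intro v hv
            have := List.mem_filter.mp hv
            simpa using this
          have hnotold : ∀ v ∈ newly, v ∉ Popped ∧ v ≠ u ∧ v ∉ rest ∧ v ∈ V := by
            intro v hv
            obtain ⟨hvL, _⟩ := hnewmem v hv
            obtain ⟨hvV, hvu, _⟩ := hadj u v (hLdef ▸ hvL)
            refine ⟨?_, hvu, ?_, hvV⟩
            · intro hvP
              obtain ⟨k, hk, hkv⟩ := List.mem_iff_getElem.mp hvP
              have hdec : Popped = Popped.take k ++ v :: Popped.drop (k + 1) := by
                conv_lhs => rw [← List.take_append_drop k Popped]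
                rw [List.drop_eq_getElem_cons hk, hkv]
              have := htopo _ _ _ hdec u huV (hLdef ▸ hvL)
              exact huP (List.mem_of_mem_take this)
            · intro hvrest
              have := hqinv v (List.mem_cons_of_mem _ hvrest) u huV (hLdef ▸ hvL)
              exact huP this
          refine ?_
          rw [pvKahnLoopA]
          simp only
          rw [hq']
          have hproc : (Popped.length : Int) + 1 = ((Popped ++ [u]).length : Int) := by
            simp
          rw [hproc]
          refine ih (Popped ++ [u]) (rest ++ newly) _ ⟨?_, ?_, ?_, ?_, ?_, ?_⟩ (by
            simp only [List.length_append, List.length_singleton]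
            omega)
          · -- nodup
            have hshape : Popped ++ [u] ++ (rest ++ newly) = (Popped ++ u :: rest) ++ newly := by
              simp
            rw [hshape, List.nodup_append]
            refine ⟨hnodup, List.Nodup.filter _ (hnd u), ?_⟩
            intro a ha b hb hab
            obtain ⟨hbP, hbu, hbrest, _⟩ := hnotold b hb
            subst hab
            rcases List.mem_append.mp ha with h | h
            · exact hbP h
            · rcases List.mem_cons.mp h with h | h
              · exact hbu h
              · exact hbrest h
          · -- membership in V
            intro x hx
            rcases List.mem_append.mp hx with h | h
            · rcases List.mem_append.mp h with h | h
              · exact hmemV x (List.mem_append_left _ h)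
              · rw [List.mem_singleton.mp h]; exact huV
            · rcases List.mem_append.mp h with h | h
              · exact hmemV x (List.mem_append_right _ (List.mem_cons_of_mem _ h))
              · exact (hnotold x h).2.2.2
          · -- indegree spec
            intro c
            rw [hind' c]
            exact (keyarith c).symm
          · -- topo
            intro p1 c p2 heq d hdV hedge
            by_cases hp2 : p2 = []
            · subst hp2
              have heq2 : Popped ++ [u] = p1 ++ [c] := heq
              have hinj := List.append_inj' heq2 rfl
              obtain ⟨hP1, hcu⟩ := hinj
              have hcu' : c = u := by simpa using hcu.symm
              subst hcu'
              rw [← hP1]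
              exact hqinv c List.mem_cons_self d hdV hedge
            · have hlast := List.dropLast_append_getLast hp2
              rw [← hlast] at heq
              have heq2 : Popped ++ [u] = (p1 ++ c :: p2.dropLast) ++ [p2.getLast hp2] := by
                rw [heq]; simp
              have hinj := List.append_inj' heq2 rfl
              obtain ⟨hP1, -⟩ := hinj
              exact htopo p1 c p2.dropLast hP1 d hdV hedge
          · -- queue members have all preds popped
            intro c hc d hdV hedge
            rcases List.mem_append.mp hc with h | h
            · exact List.mem_append_left _ (hqinv c (List.mem_cons_of_mem _ h) d hdV hedge)
            · have hz : gf' c = 0 := by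
                obtain ⟨hcL, hgc⟩ := hnewmem c h
                rw [keyarith c, if_pos hcL, hgc]
                rfl
              exact hzero c hz d hdV hedge
          · -- completeness
            intro c hc hall
            by_cases hcall : ∀ d ∈ V, c ∈ adj.getD d PySem.Set.empty → d ∈ Popped
            · rcases hcomplete c hc hcall with h | h
              · exact Or.inl (List.mem_append_left _ h)
              · rcases List.mem_cons.mp h with h | h
                · exact Or.inl (List.mem_append_right _ (by rw [h]; exact List.mem_singleton_self u))
                · exact Or.inr (List.mem_append_left _ h)
            · simp only [not_forall] at hcall
              obtain ⟨d0, hd0V, hd0e, hd0P⟩ := hcall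
              have hd0u : d0 = u := by
                rcases List.mem_append.mp (hall d0 hd0V hd0e) with h | h
                · exact absurd h hd0P
                · exact List.mem_singleton.mp h
              have hcL : c ∈ L := by rw [hLdef, ← hd0u]; exact hd0e
              have hz : gf' c = 0 := hzero' c hall
              have hgc : gf c = 1 := by
                have := keyarith c
                rw [if_pos hcL, hz] at this
                omega
              refine Or.inr (List.mem_append_right _ ?_)
              rw [hnewdef]
              exact List.mem_filter.mpr ⟨hcL, by simp [hgc]⟩

-- ---------- peel loop (port B) ----------

theorem pv_peel_false (V : List Int) (adj : PySem.Dict Int (PySem.Set Int))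
    (preds : PySem.Dict Int (PySem.Set Int))
    (hpr : ∀ c x, x ∈ preds.getD c PySem.Set.empty ↔ c ∈ adj.getD x PySem.Set.empty)
    (R : List Int) (hstuck : pvStuckA V adj R) :
    ∀ (fuel : Nat) (rem : PySem.Set Int), (∀ x ∈ R, x ∈ rem) →
      pvPeelB preds fuel rem = false := by
  obtain ⟨c0, hc0⟩ := List.exists_mem_of_ne_nil R hstuck.1
  intro fuel
  induction fuel with
  | zero =>
      intro rem hsub
      rw [pvPeelB, List.isEmpty_eq_false_iff]
      exact List.ne_nil_of_mem (hsub c0 hc0)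
  | succ n ih =>
      intro rem hsub
      rw [pvPeelB]
      have hnotin : ∀ c ∈ R, c ∉ rem.filter
          (fun c => (PySem.Set.inter (preds.getD c PySem.Set.empty) rem).isEmpty) := by
        intro c hc hmem
        obtain ⟨d, hdR, hedge⟩ := hstuck.2.2 c hc
        have hd : d ∈ PySem.Set.inter (preds.getD c PySem.Set.empty) rem :=
          (PySem.Set.mem_inter _ _ _).mpr ⟨(hpr c d).mpr hedge, hsub d hdR⟩
        have h2 := (List.mem_filter.mp hmem).2
        rw [List.isEmpty_iff] at h2
        rw [h2] at hd
        exact List.not_mem_nil hd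
      by_cases hre : (rem.filter
          (fun c => (PySem.Set.inter (preds.getD c PySem.Set.empty) rem).isEmpty)).isEmpty
      · rw [if_pos hre, List.isEmpty_eq_false_iff]
        exact List.ne_nil_of_mem (hsub c0 hc0)
      · rw [if_neg hre]
        refine ih _ (fun x hx => ?_)
        exact (PySem.Set.mem_diff _ _ _).mpr ⟨hsub x hx, hnotin x hx⟩

theorem pv_peel_true (V : List Int) (adj : PySem.Dict Int (PySem.Set Int))
    (preds : PySem.Dict Int (PySem.Set Int))
    (hpr : ∀ c x, x ∈ preds.getD c PySem.Set.empty ↔ c ∈ adj.getD x PySem.Set.empty)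
    (hnostuck : ¬ ∃ R, pvStuckA V adj R) :
    ∀ (fuel : Nat) (rem : PySem.Set Int), rem.Nodup → (∀ x ∈ rem, x ∈ V) →
      rem.length + 1 ≤ fuel → pvPeelB preds fuel rem = true := by
  intro fuel
  induction fuel with
  | zero => intro rem _ _ hlen; omega
  | succ n ih =>
      intro rem hnd hsubV hlen
      rw [pvPeelB]
      by_cases hrem : rem = []
      · subst hrem
        simp
      · have hre : ¬ (rem.filter
            (fun c => (PySem.Set.inter (preds.getD c PySem.Set.empty) rem).isEmpty)).isEmpty = true := by
          intro hre
          rw [List.isEmpty_iff] at hre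
          refine hnostuck ⟨rem, hrem, hsubV, fun c hc => ?_⟩
          by_cases hcond : (PySem.Set.inter (preds.getD c PySem.Set.empty) rem).isEmpty = true
          · have hcf : c ∈ rem.filter
                (fun c => (PySem.Set.inter (preds.getD c PySem.Set.empty) rem).isEmpty) :=
              List.mem_filter.mpr ⟨hc, hcond⟩
            rw [hre] at hcf
            exact absurd hcf List.not_mem_nil
          · rw [Bool.not_eq_true, List.isEmpty_eq_false_iff] at hcond
            obtain ⟨d, hd⟩ := List.exists_mem_of_ne_nil _ hcond
            obtain ⟨hd1, hd2⟩ := (PySem.Set.mem_inter _ _ _).mp hd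
            exact ⟨d, hd2, (hpr c d).mp hd1⟩
        rw [if_neg hre]
        rw [Bool.not_eq_true, List.isEmpty_eq_false_iff] at hre
        obtain ⟨c1, hc1⟩ := List.exists_mem_of_ne_nil _ hre
        have hc1rem : c1 ∈ rem := (List.mem_filter.mp hc1).1
        have hc1out : c1 ∉ PySem.Set.diff rem
            (rem.filter (fun c => (PySem.Set.inter (preds.getD c PySem.Set.empty) rem).isEmpty)) := by
          intro hmem
          exact ((PySem.Set.mem_diff _ _ _).mp hmem).2 hc1
        refine ih _ (PySem.Set.nodup_diff _ _ hnd)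
          (fun x hx => hsubV x ((PySem.Set.mem_diff _ _ _).mp hx).1) ?_
        have hlt : (PySem.Set.diff rem
            (rem.filter (fun c => (PySem.Set.inter (preds.getD c PySem.Set.empty) rem).isEmpty))).length
            < rem.length :=
          pv_length_lt_of_ssub rem _ (PySem.Set.nodup_diff _ _ hnd)
            (fun x hx => ((PySem.Set.mem_diff _ _ _).mp hx).1) c1 hc1rem hc1out
        omega

-- ===== VERDICT (by name: the statement is the Claim_ definition above) =====
theorem pv_main (g : List (List Int)) (hpre : Pre_isPrintable g) :
    isPrintable g = isPrintable_alt g := by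
  obtain ⟨hadjchar, hadjnd, hindchar⟩ := pv_adjind_spec g hpre
  have hpredchar := pv_preds_spec g hpre
  have hVnd : (pvV g).Nodup := pv_V_nodup g
  have hadjP : ∀ d c, c ∈ (pvAdjIndA g).1.getD d PySem.Set.empty →
      c ∈ pvV g ∧ c ≠ d ∧ d ∈ pvV g :=
    fun d c h => pv_edge_props g hpre d c ((hadjchar d c).mp h)
  have hpr : ∀ c x, x ∈ (pvPredsB g).getD c PySem.Set.empty ↔
      c ∈ (pvAdjIndA g).1.getD x PySem.Set.empty :=
    fun c x => (hpredchar c x).trans (hadjchar x c).symm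
  have hA : isPrintable g = decide ((pvKahnLoopA (pvAdjIndA g).1 ((pvColorsA g).length + 1)
      ((pvColorsA g).filter (fun c => decide ((pvAdjIndA g).2.getD c 0 = 0)))
      (pvAdjIndA g).2 0) = PySem.List.len (pvColorsA g)) := rfl
  have hB : isPrintable_alt g
      = pvPeelB (pvPredsB g) ((pvColorsB g).length + 1) (pvColorsB g) := rfl
  have hVeq : pvColorsA g = pvV g := rfl
  have hBeq : pvColorsB g = pvV g := pv_colorsB_eq g
  -- initial Kahn invariant
  have hnopred : ∀ c, (pvAdjIndA g).2.getD c 0 = 0 ↔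
      ∀ d ∈ pvV g, c ∈ (pvAdjIndA g).1.getD d PySem.Set.empty → False := by
    intro c
    rw [hindchar c]
    constructor
    · intro h0 d hdV hedge
      have hlen : ((pvV g).filter
          (fun d => decide (c ∈ (pvAdjIndA g).1.getD d PySem.Set.empty))).length = 0 := by
        omega
      rw [List.length_eq_zero_iff] at hlen
      have hdf : d ∈ (pvV g).filter
          (fun d => decide (c ∈ (pvAdjIndA g).1.getD d PySem.Set.empty)) :=
        List.mem_filter.mpr ⟨hdV, by simpa using hedge⟩
      rw [hlen] at hdf
      exact List.not_mem_nil hdf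
    · intro hno
      have hlen : (pvV g).filter
          (fun d => decide (c ∈ (pvAdjIndA g).1.getD d PySem.Set.empty)) = [] := by
        rw [List.filter_eq_nil_iff]
        intro d hdV
        simp only [decide_eq_true_eq]
        exact fun he => hno d hdV he
      rw [hlen]
      rfl
  have hinv : pvInv (pvV g) (pvAdjIndA g).1 []
      ((pvColorsA g).filter (fun c => decide ((pvAdjIndA g).2.getD c 0 = 0)))
      (pvAdjIndA g).2 := by
    refine ⟨?_, ?_, ?_, ?_, ?_, ?_⟩
    · simpa using hVnd.filter _
    · intro x hx
      simp only [List.nil_append] at hx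
      exact (List.mem_filter.mp hx).1
    · intro c
      have he : (pvV g).filter (fun d => !decide (d ∈ ([] : List Int)) &&
          decide (c ∈ (pvAdjIndA g).1.getD d PySem.Set.empty))
          = (pvV g).filter (fun d => decide (c ∈ (pvAdjIndA g).1.getD d PySem.Set.empty)) :=
        List.filter_congr (fun d _ => by simp)
      rw [he]
      exact hindchar c
    · intro p1 c p2 heq
      exact absurd heq (by cases p1 <;> simp)
    · intro c hc d hdV hedge
      have h0 := (List.mem_filter.mp hc).2
      simp only [decide_eq_true_eq] at h0
      exact absurd hedge (fun he => (hnopred c).mp h0 d hdV he)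
    · intro c hc hall
      refine Or.inr (List.mem_filter.mpr ⟨hc, ?_⟩)
      simp only [decide_eq_true_eq]
      exact (hnopred c).mpr (fun d hdV he => absurd (hall d hdV he) List.not_mem_nil)
  obtain ⟨P', hloop, hPnd, hPmem, hPtopo, hPcompl⟩ :=
    pv_kahn_run (pvV g) (pvAdjIndA g).1 hVnd hadjP hadjnd ((pvColorsA g).length + 1) []
      ((pvColorsA g).filter (fun c => decide ((pvAdjIndA g).2.getD c 0 = 0)))
      (pvAdjIndA g).2 hinv (by rw [hVeq]; simp)
  simp only [List.length_nil, Nat.cast_zero] at hloop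
  rw [hA, hB, hloop]
  by_cases hstuck : ∃ R, pvStuckA (pvV g) (pvAdjIndA g).1 R
  · obtain ⟨R, hR⟩ := hstuck
    rw [pv_peel_false (pvV g) (pvAdjIndA g).1 (pvPredsB g) hpr R hR _ (pvColorsB g)
      (fun x hx => hBeq ▸ hR.2.1 x hx)]
    rw [decide_eq_false_iff_not]
    obtain ⟨x, hxR⟩ := List.exists_mem_of_ne_nil R hR.1
    have hxV : x ∈ pvV g := hR.2.1 x hxR
    have hxP : x ∉ P' := fun hxP' => pv_topo_not_mem_stuck _ _ _ _ hPtopo hR x hxP' hxR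
    intro heq
    rw [PySem.List.len_eq] at heq
    have hlen : (pvV g).length ≤ P'.length := by
      have := hVeq ▸ heq
      omega
    exact hxP ((pv_eq_mem_of_nodup_length P' (pvV g) hPnd hVnd hPmem hlen x).mpr hxV)
  · rw [pv_peel_true (pvV g) (pvAdjIndA g).1 (pvPredsB g) hpr hstuck _ (pvColorsB g)
      (hBeq ▸ hVnd) (fun x hx => hBeq ▸ hx) (by rw [hBeq, ← hVeq])]
    rw [decide_eq_true_iff]
    have hsub : ∀ c ∈ pvV g, c ∈ P' := by
      intro c hc
      by_contra hnc
      refine hstuck ⟨(pvV g).filter (fun c => !decide (c ∈ P')), ?_, ?_, ?_⟩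
      · exact List.ne_nil_of_mem (List.mem_filter.mpr ⟨hc, by simpa using hnc⟩)
      · exact fun x hx => (List.mem_filter.mp hx).1
      · intro c' hc'
        obtain ⟨hc'V, hc'P⟩ := List.mem_filter.mp hc'
        obtain ⟨d, hdV, hedge, hdP⟩ := hPcompl c' hc'V (by simpa using hc'P)
        exact ⟨d, List.mem_filter.mpr ⟨hdV, by simpa using hdP⟩, hedge⟩
    have hlen : P'.length = (pvV g).length :=
      Nat.le_antisymm (pv_nodup_length_le P' (pvV g) hPnd hPmem)
        (pv_nodup_length_le (pvV g) P' hVnd hsub)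
    rw [PySem.List.len_eq, hVeq, hlen]

theorem isPrintable_spec : Claim_equal_isPrintable := by
  intro g _ hpre
  unfold Spec_isPrintable
  exact pv_main g hpre
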